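-- pv_equiv track=rewrite | github.com/django/django | django_venv/Lib/site-packages/pip/_internal/pep425tags.py | get_darwin_arches
-- ===== SOURCE A (Python) =====
-- from collections import OrderedDict
--
-- def get_darwin_arches(major, minor, machine):
--     # type: (int, int, str) -> List[str]
--     """Return a list of supported arches (including group arches) for
--     the given major, minor and machine architecture of an macOS machine.
--     """
--     arches = []
--
--     def _supports_arch(major, minor, arch):
--         # type: (int, int, str) -> bool
--         # Looking at the application support for macOS versions in the chart
--         # provided by https://en.wikipedia.org/wiki/OS_X#Versions it appears
--         # our timeline looks roughly like:
--         #
--         # 10.0 - Introduces ppc support.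
--         # 10.4 - Introduces ppc64, i386, and x86_64 support, however the ppc64
--         #        and x86_64 support is CLI only, and cannot be used for GUI
--         #        applications.
--         # 10.5 - Extends ppc64 and x86_64 support to cover GUI applications.
--         # 10.6 - Drops support for ppc64
--         # 10.7 - Drops support for ppc
--         #
--         # Given that we do not know if we're installing a CLI or a GUI
--         # application, we must be conservative and assume it might be a GUI
--         # application and behave as if ppc64 and x86_64 support did not occur
--         # until 10.5.
--         #
--         # Note: The above information is taken from the "Application support"
--         #       column in the chart not the "Processor support" since I believe
--         #       that we care about what instruction sets an application can use
--         #       not which processors the OS supports.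
--         if arch == 'ppc':
--             return (major, minor) <= (10, 5)
--         if arch == 'ppc64':
--             return (major, minor) == (10, 5)
--         if arch == 'i386':
--             return (major, minor) >= (10, 4)
--         if arch == 'x86_64':
--             return (major, minor) >= (10, 5)
--         if arch in groups:
--             for garch in groups[arch]:
--                 if _supports_arch(major, minor, garch):
--                     return True
--         return False
--
--     groups = OrderedDict([
--         ("fat", ("i386", "ppc")),
--         ("intel", ("x86_64", "i386")),
--         ("fat64", ("x86_64", "ppc64")),
--         ("fat32", ("x86_64", "i386", "ppc")),
--     ])  # type: Dict[str, Tuple[str, ...]]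
--
--     if _supports_arch(major, minor, machine):
--         arches.append(machine)
--
--     for garch in groups:
--         if machine in groups[garch] and _supports_arch(major, minor, garch):
--             arches.append(garch)
--
--     arches.append('universal')
--
--     return arches
-- ===== SOURCE B (Python) =====
-- # Closed-form rewrite: classify the version into one of four support eras and
-- # return a precomputed answer from a per-era machine table -- no support
-- # predicate and no group scan at runtime.
-- _TABLE = {
--     0: {'ppc': ['ppc', 'fat', 'fat32'],
--         'i386': ['fat', 'fat32'],
--         'x86_64': ['fat32'],
--         'fat': ['fat'],
--         'fat32': ['fat32']},
--     1: {'ppc': ['ppc', 'fat', 'fat32'],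
--         'i386': ['i386', 'fat', 'intel', 'fat32'],
--         'x86_64': ['intel', 'fat32'],
--         'fat': ['fat'],
--         'intel': ['intel'],
--         'fat32': ['fat32']},
--     2: {'ppc': ['ppc', 'fat', 'fat32'],
--         'ppc64': ['ppc64', 'fat64'],
--         'i386': ['i386', 'fat', 'intel', 'fat32'],
--         'x86_64': ['x86_64', 'intel', 'fat64', 'fat32'],
--         'fat': ['fat'],
--         'intel': ['intel'],
--         'fat64': ['fat64'],
--         'fat32': ['fat32']},
--     3: {'ppc': ['fat', 'fat32'],
--         'ppc64': ['fat64'],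
--         'i386': ['i386', 'fat', 'intel', 'fat32'],
--         'x86_64': ['x86_64', 'intel', 'fat64', 'fat32'],
--         'fat': ['fat'],
--         'intel': ['intel'],
--         'fat64': ['fat64'],
--         'fat32': ['fat32']},
-- }
--
-- def get_darwin_arches(major, minor, machine):
--     if major < 10 or (major == 10 and minor < 4):
--         era = 0
--     elif major == 10 and minor == 4:
--         era = 1
--     elif major == 10 and minor == 5:
--         era = 2
--     else:
--         era = 3
--     return _TABLE[era].get(machine, []) + ['universal']
-- ===== Notes on version B (the rewrite author's own statement) =====
-- stated objective: alternative
-- what changed: Replaces A's recursive support predicate and runtime group scan with a four-way version-era classification and a single lookup in a precomputed (era, machine) -> arches table.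
import Mathlib
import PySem

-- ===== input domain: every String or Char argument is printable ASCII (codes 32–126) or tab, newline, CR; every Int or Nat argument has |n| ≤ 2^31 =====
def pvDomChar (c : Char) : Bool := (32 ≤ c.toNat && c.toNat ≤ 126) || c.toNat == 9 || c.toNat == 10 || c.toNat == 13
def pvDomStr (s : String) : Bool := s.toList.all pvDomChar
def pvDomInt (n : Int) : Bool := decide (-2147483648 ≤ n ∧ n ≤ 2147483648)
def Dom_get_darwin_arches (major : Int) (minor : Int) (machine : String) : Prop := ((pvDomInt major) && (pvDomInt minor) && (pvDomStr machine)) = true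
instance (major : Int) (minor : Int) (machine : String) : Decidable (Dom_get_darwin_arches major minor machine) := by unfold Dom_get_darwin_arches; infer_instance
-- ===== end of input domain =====

-- B replaces A's recursive support predicate and runtime group scan with a
-- version-era classification plus a precomputed (era, machine) answer table (objective: alternative).

-- ===== PORT A =====
-- groups OrderedDict from A
def pvGroupsA : PySem.Dict String (List String) := PySem.Dict.mk
  [("fat", ["i386", "ppc"]),
   ("intel", ["x86_64", "i386"]),
   ("fat64", ["x86_64", "ppc64"]),
   ("fat32", ["x86_64", "i386", "ppc"])]

-- _supports_arch; fuel only makes the (depth-2) recursion structurally total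
def pvSupportsA (major minor : Int) : Nat → String → Bool
  | 0, _ => false
  | fuel + 1, arch =>
    if arch = "ppc" then decide (major < 10 ∨ (major = 10 ∧ minor ≤ 5))
    else if arch = "ppc64" then decide (major = 10 ∧ minor = 5)
    else if arch = "i386" then decide (major > 10 ∨ (major = 10 ∧ minor ≥ 4))
    else if arch = "x86_64" then decide (major > 10 ∨ (major = 10 ∧ minor ≥ 5))
    else
      match pvGroupsA.get? arch with
      | some members => members.any (fun garch => pvSupportsA major minor fuel garch)
      | none => false

def get_darwin_arches (major : Int) (minor : Int) (machine : String) : List String :=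
  let arches : List String := []
  let arches := if pvSupportsA major minor 2 machine then arches ++ [machine] else arches
  let arches := pvGroupsA.keys.foldl
    (fun acc garch =>
      if (pvGroupsA.getD garch []).contains machine && pvSupportsA major minor 2 garch
      then acc ++ [garch] else acc) arches
  arches ++ ["universal"]

-- ===== PORT B =====
-- the precomputed per-era machine → arches table of Source B
def pvTableB (era : Nat) : List (String × List String) :=
  match era with
  | 0 => [("ppc", ["ppc", "fat", "fat32"]),
          ("i386", ["fat", "fat32"]),
          ("x86_64", ["fat32"]),
          ("fat", ["fat"]),
          ("fat32", ["fat32"])]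
  | 1 => [("ppc", ["ppc", "fat", "fat32"]),
          ("i386", ["i386", "fat", "intel", "fat32"]),
          ("x86_64", ["intel", "fat32"]),
          ("fat", ["fat"]),
          ("intel", ["intel"]),
          ("fat32", ["fat32"])]
  | 2 => [("ppc", ["ppc", "fat", "fat32"]),
          ("ppc64", ["ppc64", "fat64"]),
          ("i386", ["i386", "fat", "intel", "fat32"]),
          ("x86_64", ["x86_64", "intel", "fat64", "fat32"]),
          ("fat", ["fat"]),
          ("intel", ["intel"]),
          ("fat64", ["fat64"]),
          ("fat32", ["fat32"])]
  | _ => [("ppc", ["fat", "fat32"]),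
          ("ppc64", ["fat64"]),
          ("i386", ["i386", "fat", "intel", "fat32"]),
          ("x86_64", ["x86_64", "intel", "fat64", "fat32"]),
          ("fat", ["fat"]),
          ("intel", ["intel"]),
          ("fat64", ["fat64"]),
          ("fat32", ["fat32"])]

def get_darwin_arches_alt (major : Int) (minor : Int) (machine : String) : List String :=
  let era : Nat :=
    if major < 10 ∨ (major = 10 ∧ minor < 4) then 0
    else if major = 10 ∧ minor = 4 then 1
    else if major = 10 ∧ minor = 5 then 2
    else 3
  (((pvTableB era).lookup machine).getD []) ++ ["universal"]

-- ===== PRECONDITION & SPEC =====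
def Spec_get_darwin_arches (major : Int) (minor : Int) (machine : String) (out : List String) : Prop := out = get_darwin_arches_alt major minor machine
instance (major : Int) (minor : Int) (machine : String) (out : List String) : Decidable (Spec_get_darwin_arches major minor machine out) := by unfold Spec_get_darwin_arches; infer_instance

-- ===== CLAIM (what is proved, stated in full; the proofs are below) =====
def Claim_equal_get_darwin_arches : Prop := ∀ (major : Int) (minor : Int) (machine : String), Dom_get_darwin_arches major minor machine → Spec_get_darwin_arches major minor machine (get_darwin_arches major minor machine)

-- ===== LEMMAS AND PROOFS =====
set_option maxHeartbeats 3200000 in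
theorem pv_main (major minor : Int) (machine : String) :
    get_darwin_arches major minor machine = get_darwin_arches_alt major minor machine := by
  by_cases h1 : machine = "ppc"
  · subst h1
    by_cases e0 : major < 10 ∨ (major = 10 ∧ minor < 4) <;>
    by_cases e1 : major = 10 ∧ minor = 4 <;>
    by_cases e2 : major = 10 ∧ minor = 5 <;>
    by_cases c1 : major < 10 ∨ (major = 10 ∧ minor ≤ 5) <;>
    by_cases c3 : major > 10 ∨ (major = 10 ∧ minor ≥ 4) <;>
    by_cases c4 : major > 10 ∨ (major = 10 ∧ minor ≥ 5) <;>
      first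
      | (exfalso; omega)
      | (simp [get_darwin_arches, get_darwin_arches_alt, pvSupportsA, pvGroupsA, pvTableB, PySem.Dict.getD_eq_get?_getD, PySem.Dict.get?_mk_cons, PySem.Dict.keys_mk, PySem.Dict.get?_empty, PySem.Dict.get?, beq_iff_eq, List.lookup, e0, e1, e2, c1, c3, c4] <;> decide)
  by_cases h2 : machine = "ppc64"
  · subst h2
    by_cases e0 : major < 10 ∨ (major = 10 ∧ minor < 4) <;>
    by_cases e1 : major = 10 ∧ minor = 4 <;>
    by_cases e2 : major = 10 ∧ minor = 5 <;>
    by_cases c1 : major < 10 ∨ (major = 10 ∧ minor ≤ 5) <;>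
    by_cases c3 : major > 10 ∨ (major = 10 ∧ minor ≥ 4) <;>
    by_cases c4 : major > 10 ∨ (major = 10 ∧ minor ≥ 5) <;>
      first
      | (exfalso; omega)
      | (simp [get_darwin_arches, get_darwin_arches_alt, pvSupportsA, pvGroupsA, pvTableB, PySem.Dict.getD_eq_get?_getD, PySem.Dict.get?_mk_cons, PySem.Dict.keys_mk, PySem.Dict.get?_empty, PySem.Dict.get?, beq_iff_eq, List.lookup, e0, e1, e2, c1, c3, c4] <;> decide)
  by_cases h3 : machine = "i386"
  · subst h3
    by_cases e0 : major < 10 ∨ (major = 10 ∧ minor < 4) <;>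
    by_cases e1 : major = 10 ∧ minor = 4 <;>
    by_cases e2 : major = 10 ∧ minor = 5 <;>
    by_cases c1 : major < 10 ∨ (major = 10 ∧ minor ≤ 5) <;>
    by_cases c3 : major > 10 ∨ (major = 10 ∧ minor ≥ 4) <;>
    by_cases c4 : major > 10 ∨ (major = 10 ∧ minor ≥ 5) <;>
      first
      | (exfalso; omega)
      | (simp [get_darwin_arches, get_darwin_arches_alt, pvSupportsA, pvGroupsA, pvTableB, PySem.Dict.getD_eq_get?_getD, PySem.Dict.get?_mk_cons, PySem.Dict.keys_mk, PySem.Dict.get?_empty, PySem.Dict.get?, beq_iff_eq, List.lookup, e0, e1, e2, c1, c3, c4] <;> decide)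
  by_cases h4 : machine = "x86_64"
  · subst h4
    by_cases e0 : major < 10 ∨ (major = 10 ∧ minor < 4) <;>
    by_cases e1 : major = 10 ∧ minor = 4 <;>
    by_cases e2 : major = 10 ∧ minor = 5 <;>
    by_cases c1 : major < 10 ∨ (major = 10 ∧ minor ≤ 5) <;>
    by_cases c3 : major > 10 ∨ (major = 10 ∧ minor ≥ 4) <;>
    by_cases c4 : major > 10 ∨ (major = 10 ∧ minor ≥ 5) <;>
      first
      | (exfalso; omega)
      | (simp [get_darwin_arches, get_darwin_arches_alt, pvSupportsA, pvGroupsA, pvTableB, PySem.Dict.getD_eq_get?_getD, PySem.Dict.get?_mk_cons, PySem.Dict.keys_mk, PySem.Dict.get?_empty, PySem.Dict.get?, beq_iff_eq, List.lookup, e0, e1, e2, c1, c3, c4] <;> decide)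
  by_cases h5 : machine = "fat"
  · subst h5
    by_cases e0 : major < 10 ∨ (major = 10 ∧ minor < 4) <;>
    by_cases e1 : major = 10 ∧ minor = 4 <;>
    by_cases e2 : major = 10 ∧ minor = 5 <;>
    by_cases c1 : major < 10 ∨ (major = 10 ∧ minor ≤ 5) <;>
    by_cases c3 : major > 10 ∨ (major = 10 ∧ minor ≥ 4) <;>
    by_cases c4 : major > 10 ∨ (major = 10 ∧ minor ≥ 5) <;>
      first
      | (exfalso; omega)
      | (simp [get_darwin_arches, get_darwin_arches_alt, pvSupportsA, pvGroupsA, pvTableB, PySem.Dict.getD_eq_get?_getD, PySem.Dict.get?_mk_cons, PySem.Dict.keys_mk, PySem.Dict.get?_empty, PySem.Dict.get?, beq_iff_eq, List.lookup, e0, e1, e2, c1, c3, c4] <;> decide)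
  by_cases h6 : machine = "intel"
  · subst h6
    by_cases e0 : major < 10 ∨ (major = 10 ∧ minor < 4) <;>
    by_cases e1 : major = 10 ∧ minor = 4 <;>
    by_cases e2 : major = 10 ∧ minor = 5 <;>
    by_cases c1 : major < 10 ∨ (major = 10 ∧ minor ≤ 5) <;>
    by_cases c3 : major > 10 ∨ (major = 10 ∧ minor ≥ 4) <;>
    by_cases c4 : major > 10 ∨ (major = 10 ∧ minor ≥ 5) <;>
      first
      | (exfalso; omega)
      | (simp [get_darwin_arches, get_darwin_arches_alt, pvSupportsA, pvGroupsA, pvTableB, PySem.Dict.getD_eq_get?_getD, PySem.Dict.get?_mk_cons, PySem.Dict.keys_mk, PySem.Dict.get?_empty, PySem.Dict.get?, beq_iff_eq, List.lookup, e0, e1, e2, c1, c3, c4] <;> decide)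
  by_cases h7 : machine = "fat64"
  · subst h7
    by_cases e0 : major < 10 ∨ (major = 10 ∧ minor < 4) <;>
    by_cases e1 : major = 10 ∧ minor = 4 <;>
    by_cases e2 : major = 10 ∧ minor = 5 <;>
    by_cases c1 : major < 10 ∨ (major = 10 ∧ minor ≤ 5) <;>
    by_cases c3 : major > 10 ∨ (major = 10 ∧ minor ≥ 4) <;>
    by_cases c4 : major > 10 ∨ (major = 10 ∧ minor ≥ 5) <;>
      first
      | (exfalso; omega)
      | (simp [get_darwin_arches, get_darwin_arches_alt, pvSupportsA, pvGroupsA, pvTableB, PySem.Dict.getD_eq_get?_getD, PySem.Dict.get?_mk_cons, PySem.Dict.keys_mk, PySem.Dict.get?_empty, PySem.Dict.get?, beq_iff_eq, List.lookup, e0, e1, e2, c1, c3, c4] <;> decide)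
  by_cases h8 : machine = "fat32"
  · subst h8
    by_cases e0 : major < 10 ∨ (major = 10 ∧ minor < 4) <;>
    by_cases e1 : major = 10 ∧ minor = 4 <;>
    by_cases e2 : major = 10 ∧ minor = 5 <;>
    by_cases c1 : major < 10 ∨ (major = 10 ∧ minor ≤ 5) <;>
    by_cases c3 : major > 10 ∨ (major = 10 ∧ minor ≥ 4) <;>
    by_cases c4 : major > 10 ∨ (major = 10 ∧ minor ≥ 5) <;>
      first
      | (exfalso; omega)
      | (simp [get_darwin_arches, get_darwin_arches_alt, pvSupportsA, pvGroupsA, pvTableB, PySem.Dict.getD_eq_get?_getD, PySem.Dict.get?_mk_cons, PySem.Dict.keys_mk, PySem.Dict.get?_empty, PySem.Dict.get?, beq_iff_eq, List.lookup, e0, e1, e2, c1, c3, c4] <;> decide)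
  ·
    by_cases e0 : major < 10 ∨ (major = 10 ∧ minor < 4) <;>
    by_cases e1 : major = 10 ∧ minor = 4 <;>
    by_cases e2 : major = 10 ∧ minor = 5 <;>
    by_cases c1 : major < 10 ∨ (major = 10 ∧ minor ≤ 5) <;>
    by_cases c3 : major > 10 ∨ (major = 10 ∧ minor ≥ 4) <;>
    by_cases c4 : major > 10 ∨ (major = 10 ∧ minor ≥ 5) <;>
      first
      | (exfalso; omega)
      | (simp [get_darwin_arches, get_darwin_arches_alt, pvSupportsA, pvGroupsA, pvTableB, PySem.Dict.getD_eq_get?_getD, PySem.Dict.get?_mk_cons, PySem.Dict.keys_mk, PySem.Dict.get?_empty, PySem.Dict.get?, beq_iff_eq, List.lookup, e0, e1, e2, c1, c3, c4, h1, h2, h3, h4, h5, h6, h7, h8, beq_eq_false_iff_ne.mpr h1, beq_eq_false_iff_ne.mpr h2, beq_eq_false_iff_ne.mpr h3, beq_eq_false_iff_ne.mpr h4, beq_eq_false_iff_ne.mpr h5, beq_eq_false_iff_ne.mpr h6, beq_eq_false_iff_ne.mpr h7, beq_eq_false_iff_ne.mpr h8, Ne.symm h1, Ne.symm h2, Ne.symm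 h3, Ne.symm h4, Ne.symm h5, Ne.symm h6, Ne.symm h7, Ne.symm h8, beq_eq_false_iff_ne.mpr (Ne.symm h1), beq_eq_false_iff_ne.mpr (Ne.symm h2), beq_eq_false_iff_ne.mpr (Ne.symm h3), beq_eq_false_iff_ne.mpr (Ne.symm h4), beq_eq_false_iff_ne.mpr (Ne.symm h5), beq_eq_false_iff_ne.mpr (Ne.symm h6), beq_eq_false_iff_ne.mpr (Ne.symm h7), beq_eq_false_iff_ne.mpr (Ne.symm h8), List.find?] <;> decide)

-- ===== VERDICT (by name: the statement is the Claim_ definition above) =====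
theorem get_darwin_arches_spec : Claim_equal_get_darwin_arches := by
  intro major minor machine _
  exact pv_main major minor machine
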